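-- pv_equiv track=rewrite | github.com/zzy1130/ultrasound-rl-navigation | core/mdp_analysis.py | compute_reachability_layers
-- ===== SOURCE A (Python) =====
-- from collections import deque
-- from typing import Dict, List, Set, Tuple, Optional
--
-- def build_reverse_graph(graph: Dict[int, List[int]]) -> Dict[int, List[int]]:
--     """Build reverse graph where edges point from children to parents."""
--     reverse = {}
--     for node in graph:
--         if node not in reverse:
--             reverse[node] = []
--         for child in graph[node]:
--             if child not in reverse:
--                 reverse[child] = []
--     for node, children in graph.items():
--         for child in children:
--             reverse[child].append(node)
--     return reverse
--
-- def get_all_nodes(graph: Dict[int, List[int]]) -> Set[int]: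
--     """Get all nodes in the graph."""
--     nodes = set(graph.keys())
--     for children in graph.values():
--         nodes.update(children)
--     return nodes
--
-- def compute_reachability_layers(graph: Dict[int, List[int]], target: int) -> Dict[int, int]:
--     """
--     Compute reachability layers L[t] as defined in the paper.
--
--     L[0] = {s_T}
--     L[t] = {s_i | exists s_j in L[t-1] s.t. P_π(s_i, s_j) > 0}
--
--     Returns:
--         Dictionary mapping each node to its layer (distance to target).
--         Nodes that cannot reach target have layer = -1.
--     """
--     reverse_graph = build_reverse_graph(graph)
--     all_nodes = get_all_nodes(graph)
--
--     layers = {node: -1 for node in all_nodes}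
--     layers[target] = 0
--
--     queue = deque([target])
--
--     while queue:
--         node = queue.popleft()
--         current_layer = layers[node]
--         for parent in reverse_graph.get(node, []):
--             if layers[parent] == -1:
--                 layers[parent] = current_layer + 1
--                 queue.append(parent)
--
--     return layers
-- ===== SOURCE B (Python) =====
-- def compute_reachability_layers(graph, target):
--     nodes = set(graph.keys())
--     for children in graph.values():
--         nodes.update(children)
--     layers = {node: -1 for node in nodes}
--     layers[target] = 0
--     frontier = {target}
--     layer = 0
--     while frontier:
--         nxt = set()
--         for node, children in graph.items():
--             if layers[node] == -1 and any(child in frontier for child in children):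
--                 nxt.add(node)
--         for node in nxt:
--             layers[node] = layer + 1
--         layer += 1
--         frontier = nxt
--     return layers
-- ===== Notes on version B (the rewrite author's own statement) =====
-- stated objective: alternative
-- what changed: Replaces the reverse-graph construction plus deque-based BFS by layer-synchronous frontier sweeps over the forward graph: each round scans graph.items() once and labels every still-unlabelled node with a child in the current frontier.
import Mathlib
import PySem

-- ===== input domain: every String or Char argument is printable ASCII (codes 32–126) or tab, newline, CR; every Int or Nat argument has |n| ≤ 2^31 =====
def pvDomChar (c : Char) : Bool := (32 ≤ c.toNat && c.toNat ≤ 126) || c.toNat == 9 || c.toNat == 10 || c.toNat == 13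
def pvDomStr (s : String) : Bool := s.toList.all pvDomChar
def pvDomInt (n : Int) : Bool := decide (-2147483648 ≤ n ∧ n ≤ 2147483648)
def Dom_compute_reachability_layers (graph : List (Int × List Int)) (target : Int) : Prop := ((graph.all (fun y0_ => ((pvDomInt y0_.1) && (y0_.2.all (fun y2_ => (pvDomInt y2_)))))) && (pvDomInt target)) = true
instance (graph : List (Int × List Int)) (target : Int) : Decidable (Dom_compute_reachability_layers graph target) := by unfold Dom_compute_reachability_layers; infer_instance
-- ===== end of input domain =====

-- B replaces A's reverse-graph + deque BFS by layer-synchronous frontier sweeps over the forward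
-- graph (objective: alternative algorithm of similar cost); both return the same layers dict.


-- ===== PORT A =====
-- build_reverse_graph: first pass creates empty lists for every node and child, second pass appends parents
def pvBuildReverse (graph : PySem.Dict Int (List Int)) : PySem.Dict Int (List Int) :=
  let reverse := graph.items.foldl (fun rev p =>
      let rev := if rev.contains p.1 then rev else rev.insert p.1 []
      p.2.foldl (fun rev child => if rev.contains child then rev else rev.insert child []) rev)
    PySem.Dict.empty
  graph.items.foldl (fun rev p =>
      p.2.foldl (fun rev child => rev.modify child [] (fun l => l ++ [p.1])) rev) reverse

-- get_all_nodes: set of keys, then update with every children list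
def pvAllNodes (graph : PySem.Dict Int (List Int)) : PySem.Set Int :=
  graph.values.foldl (fun nodes children => PySem.Set.update nodes children)
    (PySem.Set.ofList graph.keys)

-- the while-queue loop; fuel only makes it total (layers.size + 1 is proved sufficient below)
def pvBfs (reverse : PySem.Dict Int (List Int)) :
    Nat → PySem.Dict Int Int → List Int → PySem.Dict Int Int
  | 0, layers, _ => layers
  | _ + 1, layers, [] => layers
  | fuel + 1, layers, node :: queue =>
      -- Python layers[node]: the key is always present (invariant), the default is never used
      let current := layers.getD node (-1)
      let st := (reverse.getD node []).foldl
        (fun (st : PySem.Dict Int Int × List Int) parent =>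
          if st.1.getD parent (-1) == -1 then (st.1.insert parent (current + 1), st.2 ++ [parent])
          else st)
        (layers, queue)
      pvBfs reverse fuel st.1 st.2

def compute_reachability_layers (graph : List (Int × List Int)) (target : Int) : List (Int × Int) :=
  let g := PySem.Dict.ofList graph
  let reverse := pvBuildReverse g
  let all_nodes := pvAllNodes g
  let layers := (all_nodes.foldl (fun d n => d.insert n (-1)) PySem.Dict.empty).insert target 0
  (pvBfs reverse (layers.size + 1) layers [target]).items

-- ===== PORT B =====
-- one round: scan graph.items() once, collect every unlabelled node with a child in the frontier
def pvRounds (graph : PySem.Dict Int (List Int)) :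
    Nat → PySem.Dict Int Int → PySem.Set Int → Int → PySem.Dict Int Int
  | 0, layers, _, _ => layers
  | _ + 1, layers, [], _ => layers
  | fuel + 1, layers, frontier, layer =>
      let nxt : PySem.Set Int := graph.items.foldl (fun nxt p =>
          if layers.getD p.1 (-1) == -1 && p.2.any (fun c => PySem.Set.contains frontier c) then
            PySem.Set.add nxt p.1
          else nxt)
        PySem.Set.empty
      let layers := nxt.foldl (fun d node => d.insert node (layer + 1)) layers
      pvRounds graph fuel layers nxt (layer + 1)

def compute_reachability_layers_alt (graph : List (Int × List Int)) (target : Int) : List (Int × Int) :=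
  let g := PySem.Dict.ofList graph
  let nodes := g.values.foldl (fun nodes children => PySem.Set.update nodes children)
    (PySem.Set.ofList g.keys)
  let layers := (nodes.foldl (fun d n => d.insert n (-1)) PySem.Dict.empty).insert target 0
  (pvRounds g (layers.size + 1) layers [target] 0).items

-- ===== PRECONDITION & SPEC =====
def Spec_compute_reachability_layers (graph : List (Int × List Int)) (target : Int) (out : List (Int × Int)) : Prop := out = compute_reachability_layers_alt graph target
instance (graph : List (Int × List Int)) (target : Int) (out : List (Int × Int)) : Decidable (Spec_compute_reachability_layers graph target out) := by unfold Spec_compute_reachability_layers; infer_instance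

-- ===== CLAIM (what is proved, stated in full; the proofs are below) =====
def Claim_equal_compute_reachability_layers : Prop := ∀ (graph : List (Int × List Int)) (target : Int), Dom_compute_reachability_layers graph target → Spec_compute_reachability_layers graph target (compute_reachability_layers graph target)

-- ===== LEMMAS AND PROOFS =====

-- ===== LEMMAS AND PROOFS =====

-- edge relation of the graph items list: p is a parent of c
abbrev pvEdge (gl : List (Int × List Int)) (n c : Int) : Prop := ∃ p ∈ gl, p.1 = n ∧ c ∈ p.2

-- mathematical BFS layers: pvLyr gl t k n = layer of n if discovered within k rounds, else -1
def pvLyr (gl : List (Int × List Int)) (t : Int) : Nat → Int → Int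
  | 0, n => if n = t then 0 else -1
  | k+1, n =>
    if pvLyr gl t k n ≠ -1 then pvLyr gl t k n
    else if ∃ p ∈ gl, p.1 = n ∧ ∃ c ∈ p.2, pvLyr gl t k c ≠ -1 then ((k : Int) + 1)
    else -1

lemma pvLyr_zero (gl : List (Int × List Int)) (t n : Int) :
    pvLyr gl t 0 n = if n = t then 0 else -1 := rfl

lemma pvLyr_succ (gl : List (Int × List Int)) (t : Int) (k : Nat) (n : Int) :
    pvLyr gl t (k+1) n =
      if pvLyr gl t k n ≠ -1 then pvLyr gl t k n
      else if ∃ p ∈ gl, p.1 = n ∧ ∃ c ∈ p.2, pvLyr gl t k c ≠ -1 then ((k : Int) + 1)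
      else -1 := rfl

lemma pvLyr_stable (gl : List (Int × List Int)) (t : Int) (k : Nat) (n : Int)
    (h : pvLyr gl t k n ≠ -1) : pvLyr gl t (k+1) n = pvLyr gl t k n := by
  rw [pvLyr_succ]; simp [h]

lemma pvLyr_stable_le (gl : List (Int × List Int)) (t : Int) {j k : Nat} (hjk : j ≤ k) (n : Int)
    (h : pvLyr gl t j n ≠ -1) : pvLyr gl t k n = pvLyr gl t j n := by
  induction k, hjk using Nat.le_induction with
  | base => rfl
  | succ m hm ih => rw [pvLyr_stable gl t m n (ih ▸ h), ih]

lemma pvLyr_first (gl : List (Int × List Int)) (t : Int) (k : Nat) (c : Int)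
    (h : pvLyr gl t k c ≠ -1) :
    ∃ j : Nat, j ≤ k ∧ pvLyr gl t k c = (j : Int) ∧ pvLyr gl t j c = (j : Int) := by
  induction k with
  | zero =>
    refine ⟨0, le_refl _, ?_, ?_⟩ <;>
    · rw [pvLyr_zero] at h ⊢
      by_cases hc : c = t <;> simp [hc] at h ⊢
  | succ m ih =>
    by_cases hm : pvLyr gl t m c = -1
    · rw [pvLyr_succ] at h ⊢
      simp only [hm, ne_eq, not_true_eq_false, if_false] at h ⊢
      split at h
      · rename_i hcond
        refine ⟨m + 1, le_refl _, by simp [hcond], ?_⟩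
        rw [pvLyr_succ]
        simp [hm, hcond]
      · simp at h
    · obtain ⟨j, hj1, hj2, hj3⟩ := ih hm
      exact ⟨j, Nat.le_succ_of_le hj1, by rw [pvLyr_stable gl t m c hm, hj2], hj3⟩

lemma pvLyr_parent (gl : List (Int × List Int)) (t : Int) (k : Nat) (n c : Int)
    (hn : pvLyr gl t k n = -1) (he : pvEdge gl n c) (hc : pvLyr gl t k c ≠ -1) :
    pvLyr gl t k c = (k : Int) := by
  obtain ⟨j, hjk, hval, hjj⟩ := pvLyr_first gl t k c hc
  rcases Nat.lt_or_ge j k with hlt | hge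
  · exfalso
    have hstep : pvLyr gl t (j+1) n ≠ -1 := by
      rw [pvLyr_succ]
      by_cases h1 : pvLyr gl t j n = -1
      · obtain ⟨p, hp, hp1, hp2⟩ := he
        have hcond : ∃ p ∈ gl, p.1 = n ∧ ∃ c ∈ p.2, pvLyr gl t j c ≠ -1 :=
          ⟨p, hp, hp1, c, hp2, by rw [hjj]; simp⟩
        simp [h1, hcond]; omega
      · simp [h1]
    have := pvLyr_stable_le gl t (Nat.succ_le_of_lt hlt) n hstep
    rw [hn] at this
    exact hstep this.symm
  · rw [hval]; omega

lemma pvLyr_fix (gl : List (Int × List Int)) (t : Int) (k : Nat)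
    (h : ∀ x, pvLyr gl t (k+1) x = pvLyr gl t k x) :
    ∀ m, k ≤ m → ∀ n, pvLyr gl t m n = pvLyr gl t k n := by
  intro m hm
  induction m, hm using Nat.le_induction with
  | base => intro n; rfl
  | succ m hkm ih =>
    intro n
    rw [pvLyr_succ]
    simp only [ih]
    by_cases h1 : pvLyr gl t k n = -1
    · simp only [h1, ne_eq, not_true_eq_false, if_false]
      split
      · rename_i hcond
        have := h n
        rw [pvLyr_succ] at this
        simp [h1, hcond] at this
        omega
      · rfl
    · simp [h1]
  
lemma pvCountP_split {α : Type} (l : List α) (p q r : α → Bool)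
    (hpq : ∀ x ∈ l, p x = (q x || r x)) (hdisj : ∀ x ∈ l, ¬(q x = true ∧ r x = true)) :
    l.countP p = l.countP q + l.countP r := by
  induction l with
  | nil => simp
  | cons a l ih =>
    have ha := hpq a (by simp)
    have hd := hdisj a (by simp)
    simp only [List.countP_cons, ha]
    rw [ih (fun x hx => hpq x (by simp [hx])) (fun x hx => hdisj x (by simp [hx]))]
    cases hq : q a <;> cases hr : r a <;> simp_all <;> omega

lemma pvCountP_mem {α : Type} [DecidableEq α] (l new : List α) (hl : l.Nodup)
    (hnew : new.Nodup) (hsub : ∀ x ∈ new, x ∈ l) :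
    l.countP (fun x => decide (x ∈ new)) = new.length := by
  rw [List.countP_eq_length_filter]
  have hperm : (l.filter (fun x => decide (x ∈ new))).Perm new := by
    rw [List.perm_ext_iff_of_nodup (hl.filter _) hnew]
    intro x
    simp only [List.mem_filter, decide_eq_true_eq]
    exact ⟨fun ⟨_, h2⟩ => h2, fun h => ⟨hsub x h, h⟩⟩
  exact hperm.length_eq

lemma pvBfs_nil (rev : PySem.Dict Int (List Int)) (fuel : Nat) (layers : PySem.Dict Int Int) :
    pvBfs rev fuel layers [] = layers := by
  cases fuel <;> rfl

lemma pvRounds_nil (g : PySem.Dict Int (List Int)) (fuel : Nat) (layers : PySem.Dict Int Int)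
    (layer : Int) : pvRounds g fuel layers [] layer = layers := by
  cases fuel <;> rfl

lemma pvFold_step (ps : List Int) (cur : Int) (hcur : 0 ≤ cur) :
    ∀ (layers : PySem.Dict Int Int) (q : List Int), (∀ p ∈ ps, p ∈ layers.keys) →
    ∃ new : List Int,
      (ps.foldl (fun (st : PySem.Dict Int Int × List Int) parent =>
          if st.1.getD parent (-1) == -1 then (st.1.insert parent (cur + 1), st.2 ++ [parent])
          else st) (layers, q)) =
        ((new.foldl (fun d n => d.insert n (cur + 1)) layers), q ++ new) ∧
      new.Nodup ∧ (∀ n, n ∈ new ↔ n ∈ ps ∧ layers.getD n (-1) = -1) := by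
  induction ps with
  | nil => intro layers q _; exact ⟨[], by simp, by simp, by simp⟩
  | cons p ps ih =>
    intro layers q hk
    by_cases hp : layers.getD p (-1) = -1
    · obtain ⟨new, heq, hnd, hmem⟩ := ih (layers.insert p (cur + 1)) (q ++ [p])
        (fun x hx => by
          rw [PySem.Dict.mem_keys_insert]
          exact Or.inr (hk x (by simp [hx])))
      refine ⟨p :: new, ?_, ?_, ?_⟩
      · rw [List.foldl_cons, if_pos (by simp [hp]), List.append_cons]
        simpa using heq
      · refine List.Nodup.cons (fun hmem' => ?_) hnd
        have := (hmem p).1 hmem'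
        rw [PySem.Dict.getD_insert_self] at this
        omega
      · intro n
        rw [List.mem_cons, hmem n, PySem.Dict.getD_insert]
        by_cases hnp : n = p
        · subst hnp
          simp [hp]
        · simp only [if_neg hnp, List.mem_cons]
          constructor
          · rintro (h1 | ⟨h1, h2⟩)
            · exact absurd h1 hnp
            · exact ⟨Or.inr h1, h2⟩
          · rintro ⟨h1 | h1, h2⟩
            · exact absurd h1 hnp
            · exact Or.inr ⟨h1, h2⟩
    · obtain ⟨new, heq, hnd, hmem⟩ := ih layers q (fun x hx => hk x (by simp [hx]))
      refine ⟨new, by simpa [hp] using heq, hnd, fun n => ?_⟩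
      rw [hmem n, List.mem_cons]
      constructor
      · rintro ⟨h1, h2⟩; exact ⟨Or.inr h1, h2⟩
      · rintro ⟨h1 | h1, h2⟩
        · exact absurd (h1 ▸ h2) hp
        · exact ⟨h1, h2⟩

lemma pvFoldIns_getD (new : List Int) (v : Int) :
    ∀ (d : PySem.Dict Int Int) (n : Int),
    (new.foldl (fun d n => d.insert n v) d).getD n (-1) =
      if n ∈ new then v else d.getD n (-1) := by
  induction new with
  | nil => simp
  | cons a new ih =>
    intro d n
    simp only [List.foldl_cons, ih, PySem.Dict.getD_insert, List.mem_cons]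
    by_cases h1 : n ∈ new <;> by_cases h2 : n = a <;> simp [h1, h2]

lemma pvFoldIns_keys (new : List Int) (v : Int) :
    ∀ (d : PySem.Dict Int Int), (∀ x ∈ new, x ∈ d.keys) →
    (new.foldl (fun d n => d.insert n v) d).keys = d.keys := by
  induction new with
  | nil => simp
  | cons a new ih =>
    intro d hk
    simp only [List.foldl_cons]
    rw [ih _ (fun x hx => by
      rw [PySem.Dict.mem_keys_insert]; exact Or.inr (hk x (by simp [hx])))]
    exact PySem.Dict.keys_insert_of_contains _ _
      ((PySem.Dict.contains_iff_mem_keys _ _).2 (hk a (by simp)))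

lemma pvFoldNxt (gl : List (Int × List Int)) (layers : PySem.Dict Int Int) (frontier : List Int) :
    ∀ (acc : PySem.Set Int), acc.Nodup →
    (gl.foldl (fun nxt p =>
        if layers.getD p.1 (-1) == -1 && p.2.any (fun c => PySem.Set.contains frontier c) then
          PySem.Set.add nxt p.1
        else nxt) acc).Nodup ∧
    ∀ n, n ∈ (gl.foldl (fun nxt p =>
        if layers.getD p.1 (-1) == -1 && p.2.any (fun c => PySem.Set.contains frontier c) then
          PySem.Set.add nxt p.1
        else nxt) acc) ↔
      n ∈ acc ∨ ∃ p ∈ gl, p.1 = n ∧ layers.getD p.1 (-1) = -1 ∧ ∃ c ∈ p.2, c ∈ frontier := by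
  induction gl with
  | nil => intro acc hacc; exact ⟨hacc, by simp⟩
  | cons p gl ih =>
    intro acc hacc
    simp only [List.foldl_cons]
    by_cases hc : (layers.getD p.1 (-1) == -1 && p.2.any (fun c => PySem.Set.contains frontier c)) = true
    · obtain ⟨h1, h2⟩ := ih (PySem.Set.add acc p.1) (PySem.Set.nodup_add _ _ hacc)
      rw [if_pos hc]
      refine ⟨h1, fun n => ?_⟩
      rw [h2 n, PySem.Set.mem_add]
      simp only [Bool.and_eq_true, beq_iff_eq, List.any_eq_true,
        PySem.Set.contains_eq_listContains, List.contains_iff_mem] at hc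
      constructor
      · rintro ((h | h) | h)
        · exact Or.inl h
        · exact Or.inr ⟨p, by simp, h.symm ▸ rfl, h ▸ hc.1, by
            obtain ⟨c, hc1, hc2⟩ := hc.2; exact ⟨c, hc1, hc2⟩⟩
        · obtain ⟨q, hq, hrest⟩ := h
          exact Or.inr ⟨q, by simp [hq], hrest⟩
      · rintro (h | ⟨q, hq, hq1, hq2, hq3⟩)
        · exact Or.inl (Or.inl h)
        · rcases List.mem_cons.1 hq with rfl | hq'
          · exact Or.inl (Or.inr hq1.symm)
          · exact Or.inr ⟨q, hq', hq1, hq2, hq3⟩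
    · obtain ⟨h1, h2⟩ := ih acc hacc
      rw [if_neg hc]
      refine ⟨h1, fun n => ?_⟩
      rw [h2 n]
      simp only [Bool.and_eq_true, beq_iff_eq, List.any_eq_true,
        PySem.Set.contains_eq_listContains, List.contains_iff_mem, not_and_or] at hc
      constructor
      · rintro (h | ⟨q, hq, hrest⟩)
        · exact Or.inl h
        · exact Or.inr ⟨q, by simp [hq], hrest⟩
      · rintro (h | ⟨q, hq, hq1, hq2, hq3⟩)
        · exact Or.inl h
        · rcases List.mem_cons.1 hq with rfl | hq'
          · exfalso
            rcases hc with hc | hc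
            · exact hc hq2
            · exact hc hq3
          · exact Or.inr ⟨q, hq', hq1, hq2, hq3⟩

-- phase-1 dict of pvBuildReverse has only [] values
lemma pvRevPhase1_getD (gl : List (Int × List Int)) :
    ∀ (d : PySem.Dict Int (List Int)), (∀ c, d.getD c [] = []) →
    ∀ c, (gl.foldl (fun rev p =>
        (p.2.foldl (fun rev child => if rev.contains child then rev else rev.insert child [])
          (if rev.contains p.1 then rev else rev.insert p.1 []))) d).getD c [] = [] := by
  have inner : ∀ (cs : List Int) (d : PySem.Dict Int (List Int)), (∀ c, d.getD c [] = []) →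
      ∀ c, (cs.foldl (fun rev child => if rev.contains child then rev else rev.insert child []) d).getD c [] = [] := by
    intro cs
    induction cs with
    | nil => intro d hd c; exact hd c
    | cons a cs ih =>
      intro d hd c
      simp only [List.foldl_cons]
      refine ih _ (fun x => ?_) c
      by_cases ha : d.contains a = true
      · simp [ha, hd x]
      · rw [if_neg ha, PySem.Dict.getD_insert]
        split <;> [rfl; exact hd x]
  induction gl with
  | nil => intro d hd c; exact hd c
  | cons p gl ih =>
    intro d hd c
    simp only [List.foldl_cons]
    refine ih _ (fun x => ?_) c
    refine inner _ _ (fun y => ?_) x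
    by_cases hp : d.contains p.1 = true
    · simp [hp, hd y]
    · rw [if_neg hp, PySem.Dict.getD_insert]
      split <;> [rfl; exact hd y]

lemma pvNestedModify_eq_flat (gl : List (Int × List Int)) :
    ∀ (d : PySem.Dict Int (List Int)),
    gl.foldl (fun rev p => p.2.foldl (fun rev child => rev.modify child [] (fun l => l ++ [p.1])) rev) d =
    (gl.flatMap (fun p => p.2.map (fun c => (c, p.1)))).foldl
      (fun d q => d.modify q.1 [] (fun l => l ++ [q.2])) d := by
  induction gl with
  | nil => intro d; rfl
  | cons p gl ih =>
    intro d
    simp only [List.foldl_cons, List.flatMap_cons, List.foldl_append, ih, List.foldl_map]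

lemma pvBuildReverse_getD (g : PySem.Dict Int (List Int)) (n p : Int) :
    p ∈ (pvBuildReverse g).getD n [] ↔ pvEdge g.items p n := by
  unfold pvBuildReverse
  rw [pvNestedModify_eq_flat, PySem.Dict.getD_foldl_modify_append,
    pvRevPhase1_getD _ _ (fun c => by simp [PySem.Dict.getD_empty])]
  simp only [List.nil_append, List.mem_map, List.mem_filter, List.mem_flatMap, beq_iff_eq]
  constructor
  · rintro ⟨q, ⟨⟨pr, hpr, hq⟩, hq1⟩, rfl⟩
    obtain ⟨c, hc, rfl⟩ := hq
    exact ⟨pr, hpr, rfl, by simpa using hq1 ▸ hc⟩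
  · rintro ⟨pr, hpr, rfl, hn⟩
    exact ⟨(n, pr.1), ⟨⟨pr, hpr, ⟨n, hn, rfl⟩⟩, rfl⟩, rfl⟩

lemma pvInit_getD (allN : List Int) (t n : Int) :
    ((allN.foldl (fun d n => d.insert n (-1)) PySem.Dict.empty).insert t 0).getD n (-1) =
      if n = t then 0 else -1 := by
  have aux : ∀ (l : List Int) (d : PySem.Dict Int Int), (∀ x, d.getD x (-1) = -1) →
      ∀ x, (l.foldl (fun d n => d.insert n (-1)) d).getD x (-1) = -1 := by
    intro l
    induction l with
    | nil => intro d hd x; exact hd x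
    | cons a l ih =>
      intro d hd x
      simp only [List.foldl_cons]
      refine ih _ (fun y => ?_) x
      rw [PySem.Dict.getD_insert]
      split <;> [rfl; exact hd y]
  rw [PySem.Dict.getD_insert]
  split <;> [rfl; exact aux allN PySem.Dict.empty (fun x => by simp [PySem.Dict.getD_empty]) n]

lemma pvRounds_inv (g : PySem.Dict Int (List Int)) (t : Int) (keys₀ : List Int)
    (Hgl : ∀ p ∈ g.items, p.1 ∈ keys₀) (Hnd : keys₀.Nodup) :
    ∀ (fuel : Nat) (layers : PySem.Dict Int Int) (frontier : List Int) (k : Nat),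
    layers.keys = keys₀ →
    (∀ n, layers.getD n (-1) = pvLyr g.items t k n) →
    frontier.Nodup →
    (∀ n, n ∈ frontier ↔ pvLyr g.items t k n = (k : Int)) →
    keys₀.countP (fun n => layers.getD n (-1) == -1) ≤ fuel →
    ∃ K : Nat, (∀ x, pvLyr g.items t (K+1) x = pvLyr g.items t K x) ∧
      (pvRounds g fuel layers frontier (k : Int)).keys = keys₀ ∧
      (∀ n, (pvRounds g fuel layers frontier (k : Int)).getD n (-1) = pvLyr g.items t K n) := by
  intro fuel
  induction fuel with
  | zero =>
    intro layers frontier k hkeys hval hfnd hfmem hfuel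
    refine ⟨k, ?_, by simpa [pvRounds] using hkeys, by simpa [pvRounds] using hval⟩
    have hall : ∀ n ∈ keys₀, pvLyr g.items t k n ≠ -1 := by
      intro n hn hcon
      have : keys₀.countP (fun n => layers.getD n (-1) == -1) ≠ 0 := by
        have : (fun n => layers.getD n (-1) == -1) n = true := by
          simp [hval n, hcon]
        exact fun h0 => by
          have := List.countP_eq_zero.1 h0 n hn
          simp_all
      omega
    intro x
    by_cases hx : pvLyr g.items t k x = -1
    · rw [pvLyr_succ]
      simp only [hx, ne_eq, not_true_eq_false, if_false]
      split
      · rename_i hcond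
        obtain ⟨p, hp, hp1, c, hc, hcne⟩ := hcond
        exact absurd (hall p.1 (Hgl p hp) (hp1 ▸ hx)) (by simp)
      · rfl
    · exact pvLyr_stable _ _ _ _ hx
  | succ fuel ih =>
    intro layers frontier k hkeys hval hfnd hfmem hfuel
    cases frontier with
    | nil =>
      refine ⟨k, ?_, by simp [pvRounds_nil, hkeys], fun n => by simp [pvRounds_nil, hval n]⟩
      intro x
      by_cases hx : pvLyr g.items t k x = -1
      · rw [pvLyr_succ]
        simp only [hx, ne_eq, not_true_eq_false, if_false]
        split
        · rename_i hcond
          obtain ⟨p, hp, hp1, c, hc, hcne⟩ := hcond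
          have : pvLyr g.items t k c = (k : Int) :=
            pvLyr_parent g.items t k x c hx ⟨p, hp, hp1, hc⟩ hcne
          exact absurd ((hfmem c).2 this) (List.not_mem_nil)
        · rfl
      · exact pvLyr_stable _ _ _ _ hx
    | cons f fr =>
      obtain ⟨hnxtnd, hnxtmem0⟩ := pvFoldNxt g.items layers (f :: fr) PySem.Set.empty (by simp [PySem.Set.empty])
      set nxt := g.items.foldl (fun nxt p =>
        if layers.getD p.1 (-1) == -1 && p.2.any (fun c => PySem.Set.contains (f :: fr) c) then
          PySem.Set.add nxt p.1
        else nxt) PySem.Set.empty with hnxtdef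
      have hnxtmem : ∀ n, n ∈ nxt ↔ pvLyr g.items t (k+1) n = ((k : Int) + 1) := by
        intro n
        rw [hnxtmem0 n]
        simp only [PySem.Set.empty, List.not_mem_nil, false_or]
        constructor
        · rintro ⟨p, hp, rfl, hgd, c, hc, hcf⟩
          rw [hval] at hgd
          have hck : pvLyr g.items t k c = (k : Int) := (hfmem c).1 hcf
          rw [pvLyr_succ]
          simp only [hgd, ne_eq, not_true_eq_false, if_false]
          rw [if_pos ⟨p, hp, rfl, c, hc, by rw [hck]; omega⟩]
        · intro hl
          by_cases hkn : pvLyr g.items t k n = -1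
          · rw [pvLyr_succ] at hl
            simp only [hkn, ne_eq, not_true_eq_false, if_false] at hl
            split at hl
            · rename_i hcond
              obtain ⟨p, hp, hp1, c, hc, hcne⟩ := hcond
              have hck : pvLyr g.items t k c = (k : Int) :=
                pvLyr_parent g.items t k n c hkn ⟨p, hp, hp1, hc⟩ hcne
              exact ⟨p, hp, hp1, by rw [hval, hp1]; exact hkn, c, hc, (hfmem c).2 hck⟩
            · omega
          · exfalso
            rw [pvLyr_stable _ _ _ _ hkn] at hl
            obtain ⟨j, hj1, hj2, _⟩ := pvLyr_first g.items t k n hkn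
            rw [hj2] at hl
            omega
      have hnxtsub : ∀ x ∈ nxt, x ∈ layers.keys := by
        intro x hx
        rw [hnxtmem0 x] at hx
        simp only [PySem.Set.empty, List.not_mem_nil, false_or] at hx
        obtain ⟨p, hp, rfl, _⟩ := hx
        rw [hkeys]
        exact Hgl p hp
      have hstep : pvRounds g (fuel + 1) layers (f :: fr) (k : Int) =
          pvRounds g fuel (nxt.foldl (fun d node => d.insert node ((k : Int) + 1)) layers) nxt ((k : Int) + 1) := by
        simp only [pvRounds]
        rfl
      have hval' : ∀ n, (nxt.foldl (fun d node => d.insert node ((k : Int) + 1)) layers).getD n (-1) =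
          pvLyr g.items t (k+1) n := by
        intro n
        rw [pvFoldIns_getD]
        by_cases hn : n ∈ nxt
        · rw [if_pos hn]
          exact ((hnxtmem n).1 hn).symm
        · rw [if_neg hn, hval]
          by_cases hkn : pvLyr g.items t k n = -1
          · rw [pvLyr_succ]
            simp only [hkn, ne_eq, not_true_eq_false, if_false]
            split
            · rename_i hcond
              exfalso
              exact hn ((hnxtmem n).2 (by
                rw [pvLyr_succ]
                simp only [hkn, ne_eq, not_true_eq_false, if_false]
                rw [if_pos hcond]))
            · rfl
          · exact (pvLyr_stable _ _ _ _ hkn).symm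
      have hkeys' : (nxt.foldl (fun d node => d.insert node ((k : Int) + 1)) layers).keys = keys₀ := by
        rw [pvFoldIns_keys _ _ _ hnxtsub, hkeys]
      by_cases hne : nxt = []
      · rw [hstep, hne]
        simp only [List.foldl_nil]
        rw [pvRounds_nil]
        refine ⟨k, ?_, hkeys, hval⟩
        intro x
        have h1 := hval' x
        rw [hne, List.foldl_nil] at h1
        rw [← h1]
        exact hval x
      · have hfuel' : keys₀.countP (fun n =>
            (nxt.foldl (fun d node => d.insert node ((k : Int) + 1)) layers).getD n (-1) == -1) ≤ fuel := by
          have hsplit := pvCountP_split keys₀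
            (fun n => layers.getD n (-1) == -1)
            (fun n => (nxt.foldl (fun d node => d.insert node ((k : Int) + 1)) layers).getD n (-1) == -1)
            (fun n => decide (n ∈ nxt))
            (fun x _ => by
              beta_reduce
              rw [pvFoldIns_getD]
              by_cases hx : x ∈ nxt
              · have : layers.getD x (-1) = -1 := by
                  rw [hval]
                  have := (hnxtmem0 x).1 hx
                  simp only [PySem.Set.empty, List.not_mem_nil, false_or] at this
                  obtain ⟨p, hp, rfl, hgd, _⟩ := this
                  rw [hval] at hgd
                  exact hgd
                simp [hx, this]
              · simp [hx])
            (fun x _ => by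
              beta_reduce
              rw [pvFoldIns_getD]
              by_cases hx : x ∈ nxt
              · simp [hx]
                omega
              · simp [hx])
          have hmemc := pvCountP_mem keys₀ nxt Hnd hnxtnd
            (fun x hx => hkeys ▸ hnxtsub x hx)
          have hlen : 0 < nxt.length := by
            rcases List.exists_cons_of_ne_nil hne with ⟨a, l, h⟩
            rw [h]; simp
          omega
        obtain ⟨K, hK1, hK2, hK3⟩ := ih
          (nxt.foldl (fun d node => d.insert node ((k : Int) + 1)) layers) nxt (k + 1)
          hkeys' (by exact_mod_cast hval') hnxtnd
          (fun n => by exact_mod_cast hnxtmem n) hfuel'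
        refine ⟨K, hK1, ?_, ?_⟩
        · rw [hstep]
          have : ((k : Int) + 1) = ((k + 1 : Nat) : Int) := by push_cast; ring
          rw [this]
          exact hK2
        · intro n
          rw [hstep]
          have : ((k : Int) + 1) = ((k + 1 : Nat) : Int) := by push_cast; ring
          rw [this]
          exact hK3 n

-- terminal state of the A-side BFS: empty queue means the layer map is complete
lemma pvBfs_terminal (gl : List (Int × List Int)) (t : Int) (D : List Int) (k : Nat)
    (layers : PySem.Dict Int Int)
    (hval : ∀ n, layers.getD n (-1) =
      if pvLyr gl t k n = -1 ∧ ∃ c ∈ D, pvEdge gl n c then ((k : Int) + 1) else pvLyr gl t k n)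
    (hcov : ∀ n, pvLyr gl t k n = (k : Int) → n ∈ D)
    (hq2 : ∀ n, ¬(pvLyr gl t k n = -1 ∧ ∃ c ∈ D, pvEdge gl n c)) :
    (∀ x, pvLyr gl t (k+1) x = pvLyr gl t k x) ∧
    (∀ n, layers.getD n (-1) = pvLyr gl t k n) := by
  constructor
  · intro x
    by_cases hx : pvLyr gl t k x = -1
    · rw [pvLyr_succ]
      simp only [hx, ne_eq, not_true_eq_false, if_false]
      split
      · rename_i hcond
        obtain ⟨p, hp, hp1, c, hc, hcne⟩ := hcond
        have hck : pvLyr gl t k c = (k : Int) :=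
          pvLyr_parent gl t k x c hx ⟨p, hp, hp1, hc⟩ hcne
        exact absurd ⟨hx, c, hcov c hck, p, hp, hp1, hc⟩ (hq2 x)
      · rfl
    · exact pvLyr_stable _ _ _ _ hx
  · intro n
    rw [hval n, if_neg (hq2 n)]

lemma pvBfs_inv (rev : PySem.Dict Int (List Int)) (gl : List (Int × List Int)) (t : Int)
    (keys₀ : List Int)
    (Hrev : ∀ n p, p ∈ rev.getD n [] ↔ pvEdge gl p n)
    (Hgl : ∀ p ∈ gl, p.1 ∈ keys₀) (Hnd : keys₀.Nodup) :
    ∀ (fuel : Nat) (layers : PySem.Dict Int Int) (q1 q2 D : List Int) (k : Nat),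
    layers.keys = keys₀ →
    (∀ n, layers.getD n (-1) =
      if pvLyr gl t k n = -1 ∧ ∃ c ∈ D, pvEdge gl n c then ((k : Int) + 1) else pvLyr gl t k n) →
    (∀ n ∈ D, pvLyr gl t k n = (k : Int)) →
    (∀ n, pvLyr gl t k n = (k : Int) → n ∈ D ∨ n ∈ q1) →
    (∀ n ∈ q1, pvLyr gl t k n = (k : Int) ∧ n ∉ D) →
    q1.Nodup →
    (∀ n, n ∈ q2 ↔ (pvLyr gl t k n = -1 ∧ ∃ c ∈ D, pvEdge gl n c)) →
    q2.Nodup →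
    q1.length + q2.length + keys₀.countP (fun n => layers.getD n (-1) == -1) ≤ fuel →
    ∃ K : Nat, (∀ x, pvLyr gl t (K+1) x = pvLyr gl t K x) ∧
      (pvBfs rev fuel layers (q1 ++ q2)).keys = keys₀ ∧
      (∀ n, (pvBfs rev fuel layers (q1 ++ q2)).getD n (-1) = pvLyr gl t K n) := by
  intro fuel
  induction fuel with
  | zero =>
    intro layers q1 q2 D k hkeys hval hD hcov hq1 hq1nd hq2 hq2nd hfuel
    have hq1e : q1 = [] := List.eq_nil_of_length_eq_zero (by omega)
    have hq2e : q2 = [] := List.eq_nil_of_length_eq_zero (by omega)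
    subst hq1e; subst hq2e
    obtain ⟨hfix, hv⟩ := pvBfs_terminal gl t D k layers hval
      (fun n hn => (hcov n hn).resolve_right (List.not_mem_nil))
      (fun n hn => by simpa using (hq2 n).2 hn)
    exact ⟨k, hfix, by simpa [pvBfs_nil] using hkeys, fun n => by simpa [pvBfs_nil] using hv n⟩
  | succ fuel ih =>
    intro layers q1 q2 D k hkeys hval hD hcov hq1 hq1nd hq2 hq2nd hfuel
    have process : ∀ (layers : PySem.Dict Int Int) (node : Int) (q1' q2 D : List Int) (k : Nat),
        layers.keys = keys₀ →
        (∀ n, layers.getD n (-1) =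
          if pvLyr gl t k n = -1 ∧ ∃ c ∈ D, pvEdge gl n c then ((k : Int) + 1) else pvLyr gl t k n) →
        (∀ n ∈ D, pvLyr gl t k n = (k : Int)) →
        (∀ n, pvLyr gl t k n = (k : Int) → n ∈ D ∨ n ∈ node :: q1') →
        (∀ n ∈ node :: q1', pvLyr gl t k n = (k : Int) ∧ n ∉ D) →
        (node :: q1').Nodup →
        (∀ n, n ∈ q2 ↔ (pvLyr gl t k n = -1 ∧ ∃ c ∈ D, pvEdge gl n c)) →
        q2.Nodup →
        (node :: q1').length + q2.length + keys₀.countP (fun n => layers.getD n (-1) == -1) ≤ fuel + 1 →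
        ∃ K : Nat, (∀ x, pvLyr gl t (K+1) x = pvLyr gl t K x) ∧
          (pvBfs rev (fuel + 1) layers (node :: (q1' ++ q2))).keys = keys₀ ∧
          (∀ n, (pvBfs rev (fuel + 1) layers (node :: (q1' ++ q2))).getD n (-1) = pvLyr gl t K n) := by
      clear hkeys hval hD hcov hq1 hq1nd hq2 hq2nd hfuel layers q1 q2 D k
      intro layers node q1' q2 D k hkeys hval hD hcov hq1 hq1nd hq2 hq2nd hfuel
      have hnode := hq1 node (by simp)
      have hcur : layers.getD node (-1) = (k : Int) := by
        rw [hval node, if_neg (fun h => by rw [hnode.1] at h; omega)]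
        exact hnode.1
      have hps : ∀ p ∈ rev.getD node [], p ∈ layers.keys := by
        intro p hp
        obtain ⟨pr, hpr, hpr1, _⟩ := (Hrev node p).1 hp
        rw [hkeys]
        exact hpr1 ▸ Hgl pr hpr
      obtain ⟨new, heq, hnewnd, hnewmem⟩ :=
        pvFold_step (rev.getD node []) (k : Int) (by omega) layers (q1' ++ q2) hps
      -- characterisation of the newly discovered nodes
      have hnewchar : ∀ n, n ∈ new ↔
          pvLyr gl t k n = -1 ∧ pvEdge gl n node ∧ ¬(∃ c ∈ D, pvEdge gl n c) := by
        intro n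
        rw [hnewmem n, Hrev node n]
        constructor
        · rintro ⟨hedge, hgd⟩
          rw [hval n] at hgd
          split at hgd
          · omega
          · rename_i hS
            refine ⟨hgd, hedge, fun hc => hS ⟨hgd, hc⟩⟩
        · rintro ⟨hlyr, hedge, hnc⟩
          refine ⟨hedge, ?_⟩
          rw [hval n, if_neg (fun h => hnc h.2)]
          exact hlyr
      have hnewsub : ∀ x ∈ new, x ∈ layers.keys := by
        intro x hx
        obtain ⟨_, hedge, _⟩ := (hnewchar x).1 hx
        obtain ⟨pr, hpr, hpr1, _⟩ := hedge
        rw [hkeys]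
        exact hpr1 ▸ Hgl pr hpr
      -- step the invariant to D' = node :: D
      have hval' : ∀ n, (new.foldl (fun d n => d.insert n ((k : Int) + 1)) layers).getD n (-1) =
          if pvLyr gl t k n = -1 ∧ ∃ c ∈ node :: D, pvEdge gl n c then ((k : Int) + 1)
          else pvLyr gl t k n := by
        intro n
        rw [pvFoldIns_getD]
        by_cases hn : n ∈ new
        · obtain ⟨hlyr, hedge, _⟩ := (hnewchar n).1 hn
          rw [if_pos hn, if_pos ⟨hlyr, node, by simp, hedge⟩]
        · rw [if_neg hn, hval n]
          by_cases hS : pvLyr gl t k n = -1 ∧ ∃ c ∈ D, pvEdge gl n c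
          · rw [if_pos hS, if_pos ⟨hS.1, hS.2.choose,
              List.mem_cons_of_mem _ hS.2.choose_spec.1, hS.2.choose_spec.2⟩]
          · rw [if_neg hS, if_neg ?_]
            rintro ⟨hlyr, c, hc, hedge⟩
            rcases List.mem_cons.1 hc with rfl | hcD
            · exact hn ((hnewchar n).2 ⟨hlyr, hedge, fun h => hS ⟨hlyr, h⟩⟩)
            · exact hS ⟨hlyr, c, hcD, hedge⟩
      have hq2' : ∀ n, n ∈ q2 ++ new ↔
          (pvLyr gl t k n = -1 ∧ ∃ c ∈ node :: D, pvEdge gl n c) := by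
        intro n
        rw [List.mem_append, hq2 n, hnewchar n]
        constructor
        · rintro (⟨hlyr, c, hc, hedge⟩ | ⟨hlyr, hedge, _⟩)
          · exact ⟨hlyr, c, by simp [hc], hedge⟩
          · exact ⟨hlyr, node, by simp, hedge⟩
        · rintro ⟨hlyr, c, hc, hedge⟩
          rcases List.mem_cons.1 hc with rfl | hcD
          · by_cases hD' : ∃ c ∈ D, pvEdge gl n c
            · exact Or.inl ⟨hlyr, hD'⟩
            · exact Or.inr ⟨hlyr, hedge, hD'⟩
          · exact Or.inl ⟨hlyr, c, hcD, hedge⟩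
      have hq2nd' : (q2 ++ new).Nodup := by
        refine List.Nodup.append hq2nd hnewnd (fun x hx1 hx2 => ?_)
        obtain ⟨hlyr, hDc⟩ := (hq2 x).1 hx1
        exact ((hnewchar x).1 hx2).2.2 hDc
      -- fuel accounting
      have hcount : keys₀.countP (fun n => layers.getD n (-1) == -1) =
          keys₀.countP (fun n =>
            (new.foldl (fun d n => d.insert n ((k : Int) + 1)) layers).getD n (-1) == -1) +
          new.length := by
        rw [pvCountP_split keys₀ (fun n => layers.getD n (-1) == -1)
          (fun n => (new.foldl (fun d n => d.insert n ((k : Int) + 1)) layers).getD n (-1) == -1)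
          (fun n => decide (n ∈ new))
          (fun x _ => by
            beta_reduce
            rw [pvFoldIns_getD]
            by_cases hx : x ∈ new
            · have := ((hnewmem x).1 hx).2
              simp [hx, this]
            · simp [hx])
          (fun x _ => by
            beta_reduce
            rw [pvFoldIns_getD]
            by_cases hx : x ∈ new
            · simp [hx]; omega
            · simp [hx]),
          pvCountP_mem keys₀ new Hnd hnewnd (fun x hx => hkeys ▸ hnewsub x hx)]
      -- unfold one step of pvBfs
      have hstep : pvBfs rev (fuel + 1) layers (node :: (q1' ++ q2)) =
          pvBfs rev fuel (new.foldl (fun d n => d.insert n ((k : Int) + 1)) layers)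
            (q1' ++ (q2 ++ new)) := by
        simp only [pvBfs, hcur]
        rw [heq]
        rw [List.append_assoc]
      rw [hstep]
      exact ih (new.foldl (fun d n => d.insert n ((k : Int) + 1)) layers) q1' (q2 ++ new)
        (node :: D) k
        (by rw [pvFoldIns_keys _ _ _ hnewsub]; exact hkeys)
        hval'
        (fun n hn => by
          rcases List.mem_cons.1 hn with rfl | hnD
          · exact hnode.1
          · exact hD n hnD)
        (fun n hn => by
          rcases hcov n hn with hnD | hnq
          · exact Or.inl (by simp [hnD])
          · rcases List.mem_cons.1 hnq with rfl | hq1'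
            · exact Or.inl (by simp)
            · exact Or.inr hq1')
        (fun n hn => by
          obtain ⟨h1, h2⟩ := hq1 n (by simp [hn])
          refine ⟨h1, fun hc => ?_⟩
          rcases List.mem_cons.1 hc with rfl | hnD
          · exact (List.nodup_cons.1 hq1nd).1 hn
          · exact h2 hnD)
        (List.nodup_cons.1 hq1nd).2
        hq2' hq2nd'
        (by
          simp only [List.length_cons, List.length_append] at hfuel ⊢
          omega)
    cases q1 with
    | cons node q1' =>
      exact process layers node q1' q2 D k hkeys hval hD hcov hq1 hq1nd hq2 hq2nd hfuel
    | nil =>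
      cases q2 with
      | nil =>
        obtain ⟨hfix, hv⟩ := pvBfs_terminal gl t D k layers hval
          (fun n hn => (hcov n hn).resolve_right (List.not_mem_nil))
          (fun n hn => by simpa using (hq2 n).2 hn)
        exact ⟨k, hfix, by simpa [pvBfs_nil] using hkeys, fun n => by simpa [pvBfs_nil] using hv n⟩
      | cons n2 q2' =>
        -- layer change: restart at k+1 with the discovered frontier as new q1
        have hSfix : ∀ n, (pvLyr gl t k n = -1 ∧ ∃ c ∈ D, pvEdge gl n c) ↔
            pvLyr gl t (k+1) n = ((k : Int) + 1) := by
          intro n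
          constructor
          · rintro ⟨hlyr, c, hc, hedge⟩
            rw [pvLyr_succ]
            simp only [hlyr, ne_eq, not_true_eq_false, if_false]
            obtain ⟨p, hp, hp1, hcp⟩ := hedge
            rw [if_pos ⟨p, hp, hp1, c, hcp, by rw [hD c hc]; omega⟩]
          · intro hl
            by_cases hkn : pvLyr gl t k n = -1
            · rw [pvLyr_succ] at hl
              simp only [hkn, ne_eq, not_true_eq_false, if_false] at hl
              split at hl
              · rename_i hcond
                obtain ⟨p, hp, hp1, c, hc, hcne⟩ := hcond
                have hck : pvLyr gl t k c = (k : Int) :=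
                  pvLyr_parent gl t k n c hkn ⟨p, hp, hp1, hc⟩ hcne
                exact ⟨hkn, c, (hcov c hck).resolve_right (List.not_mem_nil), p, hp, hp1, hc⟩
              · omega
            · exfalso
              rw [pvLyr_stable _ _ _ _ hkn] at hl
              obtain ⟨j, hj1, hj2, _⟩ := pvLyr_first gl t k n hkn
              rw [hj2] at hl
              omega
        have hgoal := process layers n2 q2' [] [] (k + 1)
          hkeys
          (fun n => by
            push_cast
            rw [hval n]
            simp only [List.not_mem_nil, false_and, exists_false, and_false, if_false]
            by_cases hS : pvLyr gl t k n = -1 ∧ ∃ c ∈ D, pvEdge gl n c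
            · rw [if_pos hS]
              exact ((hSfix n).1 hS).symm
            · rw [if_neg hS]
              by_cases hkn : pvLyr gl t k n = -1
              · rw [pvLyr_succ]
                simp only [hkn, ne_eq, not_true_eq_false, if_false]
                split
                · rename_i hcond
                  exfalso
                  exact hS ((hSfix n).2 (by
                    rw [pvLyr_succ]
                    simp only [hkn, ne_eq, not_true_eq_false, if_false]
                    rw [if_pos hcond]))
                · rfl
              · exact (pvLyr_stable _ _ _ _ hkn).symm)
          (by simp)
          (fun n hn => by
            push_cast at hn
            exact Or.inr ((hq2 n).2 ((hSfix n).2 hn)))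
          (fun n hn => by
            push_cast
            exact ⟨(hSfix n).1 ((hq2 n).1 hn), List.not_mem_nil⟩)
          hq2nd
          (fun n => by simp)
          List.nodup_nil
          (by simp only [List.length_cons, List.length_nil] at hfuel ⊢; omega)
        simpa using hgoal

lemma pvFoldUpdate_nodup (l : List (List Int)) :
    ∀ (s : PySem.Set Int), s.Nodup → (l.foldl (fun s cs => PySem.Set.update s cs) s).Nodup := by
  induction l with
  | nil => intro s hs; exact hs
  | cons a l ih => intro s hs; exact ih _ (PySem.Set.nodup_update _ _ hs)

lemma pvFoldUpdate_mem (l : List (List Int)) :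
    ∀ (s : PySem.Set Int) (n : Int),
    n ∈ l.foldl (fun s cs => PySem.Set.update s cs) s ↔ n ∈ s ∨ ∃ cs ∈ l, n ∈ cs := by
  induction l with
  | nil => intro s n; simp
  | cons a l ih =>
    intro s n
    rw [List.foldl_cons, ih, PySem.Set.mem_update]
    constructor
    · rintro ((h | h) | ⟨cs, hcs, hn⟩)
      · exact Or.inl h
      · exact Or.inr ⟨a, by simp, h⟩
      · exact Or.inr ⟨cs, by simp [hcs], hn⟩
    · rintro (h | ⟨cs, hcs, hn⟩)
      · exact Or.inl (Or.inl h)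
      · rcases List.mem_cons.1 hcs with rfl | hcs'
        · exact Or.inl (Or.inr hn)
        · exact Or.inr ⟨cs, hcs', hn⟩

theorem compute_reachability_layers_eq (graph : List (Int × List Int)) (target : Int) :
    compute_reachability_layers graph target = compute_reachability_layers_alt graph target := by
  simp only [compute_reachability_layers, compute_reachability_layers_alt, pvAllNodes]
  set g := PySem.Dict.ofList graph with hg
  set gl := g.items with hgl
  set allN := g.values.foldl (fun nodes children => PySem.Set.update nodes children)
    (PySem.Set.ofList g.keys) with hallN
  set layers₀ := (allN.foldl (fun d n => d.insert n (-1)) PySem.Dict.empty).insert target 0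
    with hlayers₀
  set keys₀ := layers₀.keys with hkeys₀
  have hKeysFold : (allN.foldl (fun d n => d.insert n (-1)) PySem.Dict.empty).keys = allN := by
    rw [PySem.Dict.keys_foldl_insert allN (fun _ _ => (-1 : Int)), PySem.Dict.keys_empty,
      PySem.Set.update_nil_left, PySem.Set.ofList_eq_self_of_nodup]
    exact pvFoldUpdate_nodup _ _ (PySem.Set.nodup_ofList _)
  have hAllNd : allN.Nodup := pvFoldUpdate_nodup _ _ (PySem.Set.nodup_ofList _)
  have hndk : keys₀.Nodup :=
    PySem.Dict.nodup_keys_insert _ _ _ (by rw [hKeysFold]; exact hAllNd)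
  have hsub : ∀ x ∈ allN, x ∈ keys₀ := fun x hx =>
    (PySem.Dict.mem_keys_insert _ _ _ _).2 (Or.inr (by rw [hKeysFold]; exact hx))
  have hglk : ∀ p ∈ gl, p.1 ∈ keys₀ := by
    intro p hp
    refine hsub _ ((pvFoldUpdate_mem _ _ _).2 (Or.inl ((PySem.Set.mem_ofList _ _).2 ?_)))
    simp only [PySem.Dict.keys]
    exact List.mem_map_of_mem hp
  have hlen : keys₀.length = layers₀.size := by
    simp [hkeys₀, PySem.Dict.keys, PySem.Dict.size]
  have hval₀ : ∀ n, layers₀.getD n (-1) = pvLyr gl target 0 n := by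
    intro n
    rw [hlayers₀, pvInit_getD, pvLyr_zero]
  -- run the A-side BFS
  obtain ⟨KA, hKA, hkA, hvA⟩ := pvBfs_inv (pvBuildReverse g) gl target keys₀
    (fun n p => pvBuildReverse_getD g n p) hglk hndk
    (layers₀.size + 1) layers₀ [target] [] [] 0
    rfl
    (fun n => by rw [if_neg (by simp)]; exact hval₀ n)
    (by simp)
    (fun n h => by
      rw [Nat.cast_zero, pvLyr_zero] at h
      split at h
      · rename_i h'; exact Or.inr (by simp [h'])
      · omega)
    (fun n hn => by
      rcases List.mem_singleton.1 hn with rfl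
      refine ⟨?_, List.not_mem_nil⟩
      rw [Nat.cast_zero, pvLyr_zero, if_pos rfl])
    (List.nodup_singleton _)
    (fun n => by simp)
    List.nodup_nil
    (by
      have := List.countP_le_length (l := keys₀) (p := fun n => layers₀.getD n (-1) == -1)
      simp only [List.length_singleton, List.length_nil]
      omega)
  -- run the B-side rounds
  obtain ⟨KB, hKB, hkB, hvB⟩ := pvRounds_inv g target keys₀ hglk hndk
    (layers₀.size + 1) layers₀ [target] 0
    rfl
    hval₀
    (List.nodup_singleton _)
    (fun n => by
      rw [Nat.cast_zero, pvLyr_zero]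
      constructor
      · intro hn
        rw [List.mem_singleton.1 hn, if_pos rfl]
      · intro h
        split at h
        · rename_i h'; simp [h']
        · omega)
    (by
      have := List.countP_le_length (l := keys₀) (p := fun n => layers₀.getD n (-1) == -1)
      omega)
  simp only [List.append_nil] at hkA hvA
  simp only [Nat.cast_zero] at hkB hvB
  -- the two layer maps agree
  have hfix : ∀ n, pvLyr gl target KA n = pvLyr gl target KB n := by
    intro n
    rcases le_total KA KB with h | h
    · exact (pvLyr_fix gl target KA hKA KB h n).symm
    · exact pvLyr_fix gl target KB hKB KA h n
  rw [PySem.Dict.items_eq_map_keys _ (hkA ▸ hndk) (-1),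
    PySem.Dict.items_eq_map_keys _ (hkB ▸ hndk) (-1)]
  rw [hkA, hkB]
  refine List.map_congr_left (fun n _ => ?_)
  rw [hvA n, hvB n, hfix n]

-- ===== VERDICT (by name: the statement is the Claim_ definition above) =====
theorem compute_reachability_layers_spec : Claim_equal_compute_reachability_layers := by
  intro graph target _
  exact compute_reachability_layers_eq graph target
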